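-- pv_equiv track=rewrite | github.com/vosps/tropical_cyclone | data_process/download_imerg.py | generate_days
-- ===== SOURCE A (Python) =====
-- def generate_days(year):
-- 	if year in [2004,2008,2012,2016]:
-- 		days = ["{0:03}".format(i) for i in range(1,367)]
-- 	elif year == 2000:
-- 		days = ["{0:03}".format(i) for i in range(153,366)]
-- 	elif year == 2020:
-- 		days = ["{0:03}".format(i) for i in range(1,305)]
-- 	elif year == 2005:
-- 		days = ["{0:03}".format(i) for i in range(1,191)]
-- 	elif year == 2015:
-- 		days = ["{0:03}".format(i) for i in range(262,366)]
-- 	else: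
-- 		days = ["{0:03}".format(i) for i in range(1,366)]
-- 	return days
-- ===== SOURCE B (Python) =====
-- _SPANS = {
--     2000: (153, 366), 2005: (1, 191), 2015: (262, 366), 2020: (1, 305),
--     2004: (1, 367), 2008: (1, 367), 2012: (1, 367), 2016: (1, 367),
-- }
--
-- def generate_days(year):
--     start, stop = _SPANS.get(year, (1, 366))
--     # three-digit odometer: no per-element division or str.format
--     h, t, o = start // 100, start // 10 % 10, start % 10
--     out = []
--     for _ in range(stop - start):
--         out.append(chr(48 + h) + chr(48 + t) + chr(48 + o))
--         o += 1
--         if o == 10: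
--             o = 0
--             t += 1
--             if t == 10:
--                 t = 0
--                 h += 1
--     return out
-- ===== Notes on version B (the rewrite author's own statement) =====
-- stated objective: alternative
-- what changed: B looks up the (start,stop) span once in a table and then builds the labels with an incrementing three-digit odometer (carrying digit counters, chr arithmetic), instead of A's per-branch comprehensions that format each number with str.format.
import Mathlib
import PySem

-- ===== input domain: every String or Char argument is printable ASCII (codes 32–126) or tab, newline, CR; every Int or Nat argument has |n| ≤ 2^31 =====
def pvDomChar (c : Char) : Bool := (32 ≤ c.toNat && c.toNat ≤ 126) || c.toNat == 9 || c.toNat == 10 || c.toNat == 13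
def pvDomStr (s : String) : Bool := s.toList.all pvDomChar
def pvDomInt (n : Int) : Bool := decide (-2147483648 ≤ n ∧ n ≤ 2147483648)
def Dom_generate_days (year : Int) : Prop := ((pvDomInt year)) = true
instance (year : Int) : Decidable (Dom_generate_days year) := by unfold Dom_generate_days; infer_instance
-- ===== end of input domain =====

-- B replaces A's six-way if/elif chain of str.format comprehensions by a span-table lookup plus a three-digit odometer that builds each label from digit characters (objective: alternative).


-- ===== PORT A =====
-- "{0:03}".format(i): decimal string zero-padded on the left to width 3 (all i here are positive)
def pyFmt03 (i : Int) : String :=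
  let cs := (PySem.Int.toStr i).toList
  if cs.length ≥ 3 then String.ofList cs
  else String.ofList (List.replicate (3 - cs.length) '0' ++ cs)

def generate_days (year : Int) : List String :=
  if year ∈ ([2004, 2008, 2012, 2016] : List Int) then
    (PySem.List.pyRange 1 367 1).map pyFmt03
  else if year = 2000 then
    (PySem.List.pyRange 153 366 1).map pyFmt03
  else if year = 2020 then
    (PySem.List.pyRange 1 305 1).map pyFmt03
  else if year = 2005 then
    (PySem.List.pyRange 1 191 1).map pyFmt03
  else if year = 2015 then
    (PySem.List.pyRange 262 366 1).map pyFmt03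
  else
    (PySem.List.pyRange 1 366 1).map pyFmt03

-- ===== PORT B =====
def pvSpans : PySem.Dict Int (Int × Int) :=
  PySem.Dict.ofList [(2000, (153, 366)), (2005, (1, 191)), (2015, (262, 366)), (2020, (1, 305)),
                     (2004, (1, 367)), (2008, (1, 367)), (2012, (1, 367)), (2016, (1, 367))]

-- the odometer loop of Source B: n remaining iterations, digit counters h t o
def pvOdo : Nat → Int → Int → Int → List String
  | 0, _, _, _ => []
  | n + 1, h, t, o =>
    String.ofList [Char.ofNat (48 + h).toNat, Char.ofNat (48 + t).toNat, Char.ofNat (48 + o).toNat] ::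
    (if o + 1 = 10 then
       (if t + 1 = 10 then pvOdo n (h + 1) 0 0 else pvOdo n h (t + 1) 0)
     else pvOdo n h t (o + 1))

def generate_days_alt (year : Int) : List String :=
  let p := pvSpans.getD year (1, 366)
  let start := p.1
  let stop := p.2
  pvOdo (stop - start).toNat (PySem.Int.floordiv start 100)
    (PySem.Int.mod (PySem.Int.floordiv start 10) 10) (PySem.Int.mod start 10)

-- ===== PRECONDITION & SPEC =====
def Spec_generate_days (year : Int) (out : List String) : Prop := out = generate_days_alt year
instance (year : Int) (out : List String) : Decidable (Spec_generate_days year out) := by unfold Spec_generate_days; infer_instance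

-- ===== CLAIM (what is proved, stated in full; the proofs are below) =====
def Claim_equal_generate_days : Prop := ∀ (year : Int), Dom_generate_days year → Spec_generate_days year (generate_days year)

-- ===== LEMMAS AND PROOFS =====
set_option maxRecDepth 40000 in
set_option maxHeartbeats 2000000 in
theorem pv_default_case :
    (PySem.List.pyRange 1 366 1).map pyFmt03 = pvOdo 365 0 0 1 := by decide

-- ===== VERDICT (by name: the statement is the Claim_ definition above) =====
set_option maxRecDepth 40000 in
set_option maxHeartbeats 2000000 in
theorem generate_days_spec : Claim_equal_generate_days := by
  intro year _
  unfold Spec_generate_days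
  by_cases h1 : year = 2004; · subst h1; decide
  by_cases h2 : year = 2008; · subst h2; decide
  by_cases h3 : year = 2012; · subst h3; decide
  by_cases h4 : year = 2016; · subst h4; decide
  by_cases h5 : year = 2000; · subst h5; decide
  by_cases h6 : year = 2020; · subst h6; decide
  by_cases h7 : year = 2005; · subst h7; decide
  by_cases h8 : year = 2015; · subst h8; decide
  have hs : pvSpans = PySem.Dict.mk [(2000, (153, 366)), (2005, (1, 191)), (2015, (262, 366)), (2020, (1, 305)),
      (2004, (1, 367)), (2008, (1, 367)), (2012, (1, 367)), (2016, (1, 367))] := by rfl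
  have hd : PySem.Dict.getD pvSpans year (1, 366) = (1, 366) := by
    simp [hs, PySem.Dict.getD, PySem.Dict.get?_mk_cons, PySem.Dict.get?,
          Ne.symm h1, Ne.symm h2, Ne.symm h3, Ne.symm h4,
          Ne.symm h5, Ne.symm h6, Ne.symm h7, Ne.symm h8]
  have ha : generate_days year = (PySem.List.pyRange 1 366 1).map pyFmt03 := by
    simp [generate_days, h1, h2, h3, h4, h5, h6, h7, h8]
  have hb : generate_days_alt year = pvOdo 365 0 0 1 := by
    simp [generate_days_alt, hd]
  rw [ha, hb, pv_default_case]
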